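-- pv_equiv track=rewrite | github.com/google/clusterfuzz | src/python/datastore/search_tokenizer.py | _complex_tokenize
-- ===== SOURCE A (Python) =====
-- def _is_camel_case_ab(s, index):
--   """Determine if the index is at 'aB', which is the start of a camel token.
--     For example, with 'workAt', this function detects 'kA'."""
--   return index >= 1 and s[index - 1].islower() and s[index].isupper()
--
-- def _is_camel_case_abb(s, index):
--   """Determine if the index ends at 'ABb', which is the start of a camel
--     token. For example, with 'HTMLParser', this function detects 'LPa'."""
--   return (index >= 2 and s[index - 2].isupper() and s[index - 1].isupper() and
--           s[index].islower())
--
-- def _token_indices(s):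
--   """Iterate through (end_current_token_index, start_next_token_index) of
--     `s`, which is tokenized based on non-alphanumeric characters and camel
--     casing. For example, 'aa:bbCC' have 3 tokens: 'aa', 'bb', 'CC'.
--     This function iterates through (1,3), (4,5), and (6,7); they represent
--     a[a]:[b]bCC, aa:b[b][C]C, and aa:bbC[C][], respectively."""
--   index = 0
--   length = len(s)
--   while index < length:
--     if not s[index].isalnum():
--       end_index = index - 1
--       while index < length and not s[index].isalnum():
--         index += 1
--       yield end_index, index
--     elif _is_camel_case_ab(s, index):
--       yield (index - 1), index
--       index += 1
--     elif _is_camel_case_abb(s, index):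
--       yield (index - 2), (index - 1)
--       index += 1
--     else:
--       index += 1
--
--   yield (length - 1), length
--
-- def _complex_tokenize(s, limit):
--   """Tokenize a string into complex tokens. For example, a:b:c is tokenized into
--     ['a', 'b', 'c', 'a:b', 'a:b:c', 'b:c']. This method works recursively. It
--     generates all possible complex tokens starting from the first token. Then,
--     it cuts off the first token and calls _complex_tokenize(..) with the rest
--     of `s`.
--
--     `limit` restricts the number of atomic tokens."""
--   if not s:
--     return set()
--
--   tokens = []
--   second_token_index = len(s)
--   count = 0
--   for end_index, next_start_index in _token_indices(s):
--     tokens.append(s[0:(end_index + 1)])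
--     count += 1
--     second_token_index = min(next_start_index, second_token_index)
--
--     if count >= limit:
--       break
--
--   tokens = set(t.lower() for t in tokens if t.strip())
--   tokens |= _complex_tokenize(s[second_token_index:], limit=limit)
--   return tokens
-- ===== SOURCE B (Python) =====
-- def _token_ends(s):
--   """Inclusive end index of every token of `s`, found in one pass with a
--   two-character sliding window (prev2, prev1) instead of index lookups:
--   a non-alphanumeric run start, an 'aB' camel boundary, or an 'ABb' camel
--   boundary each close the current token."""
--   ends = []
--   prev2 = prev1 = None
--   for i, c in enumerate(s):
--     if not c.isalnum():
--       if prev1 is None or prev1.isalnum():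
--         ends.append(i - 1)
--     elif prev1 is not None and prev1.islower() and c.isupper():
--       ends.append(i - 1)
--     elif (prev2 is not None and prev2.isupper() and prev1 is not None
--           and prev1.isupper() and c.islower()):
--       ends.append(i - 2)
--     prev2, prev1 = prev1, c
--   ends.append(len(s) - 1)
--   return ends
--
--
-- def _complex_tokenize(s, limit):
--   """Iterative version: one result set; each round lists the token end
--   positions of the current suffix, keeps the first max(limit, 1) prefixes,
--   and cuts the suffix at the first alphanumeric character after the first
--   token end."""
--   result = set()
--   while s:
--     ends = _token_ends(s)
--     first = ends[0]
--     for e in ends[:max(limit, 1)]: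
--       t = s[:e + 1]
--       if t.strip():
--         result.add(t.lower())
--     s = s[next((j for j, c in enumerate(s) if j > first and c.isalnum()), len(s)):]
--   return result
-- ===== Notes on version B (the rewrite author's own statement) =====
-- stated objective: alternative
-- what changed: Replaces A's recursion with a per-suffix cursor generator that jumps and tracks (end,next_start)/count/min by an iterative loop that, per suffix, builds the plain list of token end positions with a two-character sliding window (no indexing), takes the first max(limit,1) of them by list slicing instead of a counting break, and computes the cut point separately as the first alphanumeric position after the first token end via next()/enumerate.
import Mathlib
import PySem

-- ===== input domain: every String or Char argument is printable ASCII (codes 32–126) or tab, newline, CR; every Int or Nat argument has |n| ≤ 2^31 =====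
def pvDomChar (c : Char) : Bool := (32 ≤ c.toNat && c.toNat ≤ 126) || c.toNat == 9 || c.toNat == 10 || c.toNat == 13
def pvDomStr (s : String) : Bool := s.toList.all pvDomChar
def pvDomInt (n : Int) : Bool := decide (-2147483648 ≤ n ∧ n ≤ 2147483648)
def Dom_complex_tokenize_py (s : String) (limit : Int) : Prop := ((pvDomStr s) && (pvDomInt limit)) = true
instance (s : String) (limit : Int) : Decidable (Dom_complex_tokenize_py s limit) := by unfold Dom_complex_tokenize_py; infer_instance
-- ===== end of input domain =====

-- B replaces A's recursion-with-cursor-generator by an iterative loop that, per suffix,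
-- lists token end positions with a two-character sliding window, keeps the first
-- max(limit,1) by list slicing, and finds the cut point by a separate enumerate scan.

-- ===== PORT A =====

-- inner 'while index < length and not s[index].isalnum(): index += 1'
def skipNonAlnum (cs : List Char) (i : Nat) : Nat :=
  if h : i < cs.length then
    if PySem.Chars.isalnum cs[i] then i else skipNonAlnum cs (i + 1)
  else i
termination_by cs.length - i
decreasing_by exact Nat.sub_succ_lt_self _ _ h

-- _is_camel_case_ab
def isCamelAB (cs : List Char) (i : Nat) : Bool :=
  decide (1 ≤ i) && PySem.Chars.islower (cs.getD (i - 1) ' ') && PySem.Chars.isupper (cs.getD i ' ')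

-- _is_camel_case_abb
def isCamelABB (cs : List Char) (i : Nat) : Bool :=
  decide (2 ≤ i) && PySem.Chars.isupper (cs.getD (i - 2) ' ') && PySem.Chars.isupper (cs.getD (i - 1) ' ')
    && PySem.Chars.islower (cs.getD i ' ')

theorem one_le_intCast (n : Nat) (h : 1 ≤ n) : (1 : Int) ≤ (n : Int) :=
  Nat.one_le_cast.mpr h

theorem one_le_intCast_sub_one (n : Nat) (h : 2 ≤ n) : (1 : Int) ≤ (n : Int) - 1 :=
  le_sub_iff_add_le.mpr (by exact_mod_cast h)

theorem self_le_skipNonAlnum (cs : List Char) (i : Nat) : i ≤ skipNonAlnum cs i := by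
  unfold skipNonAlnum
  split
  · split
    · exact le_refl i
    · exact le_trans (Nat.le_succ i) (self_le_skipNonAlnum cs (i + 1))
  · exact le_refl i
termination_by cs.length - i
decreasing_by exact Nat.sub_succ_lt_self _ _ ‹i < cs.length›

theorem skipNonAlnum_step (cs : List Char) (i : Nat) (h : i < cs.length)
    (hna : PySem.Chars.isalnum cs[i] = false) :
    skipNonAlnum cs i = skipNonAlnum cs (i + 1) := by
  rw [skipNonAlnum]
  simp [h, hna]

theorem lt_skipNonAlnum (cs : List Char) (i : Nat) (h : i < cs.length)
    (hna : PySem.Chars.isalnum cs[i] = false) : i < skipNonAlnum cs i := by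
  rw [skipNonAlnum_step cs i h hna]
  exact Nat.lt_of_lt_of_le (Nat.lt_succ_self i) (self_le_skipNonAlnum cs (i + 1))

-- the while/yield loop of _token_indices
def tokenIndicesGo (cs : List Char) (i : Nat) : List (Int × Int) :=
  if h : i < cs.length then
    if hna : PySem.Chars.isalnum cs[i] = false then
      let j := skipNonAlnum cs i
      ((i : Int) - 1, (j : Int)) :: tokenIndicesGo cs j
    else if isCamelAB cs i then
      ((i : Int) - 1, (i : Int)) :: tokenIndicesGo cs (i + 1)
    else if isCamelABB cs i then
      ((i : Int) - 2, (i : Int) - 1) :: tokenIndicesGo cs (i + 1)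
    else tokenIndicesGo cs (i + 1)
  else []
termination_by cs.length - i
decreasing_by
  · exact Nat.sub_lt_sub_left h (lt_skipNonAlnum cs i h hna)
  · exact Nat.sub_succ_lt_self _ _ h
  · exact Nat.sub_succ_lt_self _ _ h
  · exact Nat.sub_succ_lt_self _ _ h

-- _token_indices
def tokenIndices (cs : List Char) : List (Int × Int) :=
  tokenIndicesGo cs 0 ++ [((cs.length : Int) - 1, (cs.length : Int))]

-- the for loop of _complex_tokenize: accumulates (tokens, second_token_index), breaks on count >= limit
def collectA (cs : List Char) (limit : Int) :
    List (Int × Int) → List (List Char) → Int → Int → List (List Char) × Int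
  | [], toks, second, _count => (toks, second)
  | (e, n) :: rest, toks, second, count =>
    let toks := toks ++ [PySem.List.slice cs (some 0) (some (e + 1))]
    let count := count + 1
    let second := min n second
    if limit ≤ count then (toks, second) else collectA cs limit rest toks second count

theorem tokenIndicesGo_snd_pos (cs : List Char) (i : Nat) :
    ∀ p ∈ tokenIndicesGo cs i, 1 ≤ p.2 := by
  induction i using tokenIndicesGo.induct cs with
  | case1 x h hna j ih =>
    rw [tokenIndicesGo]
    simp only [h, dif_pos, hna, reduceIte]
    intro p hp
    rcases List.mem_cons.mp hp with hp | hp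
    · rw [hp]
      exact one_le_intCast _ (Nat.lt_of_le_of_lt (Nat.zero_le x) (lt_skipNonAlnum cs x h hna))
    · exact ih p hp
  | case2 x h hna hab ih =>
    rw [tokenIndicesGo]
    simp only [h, dif_pos, hna, hab, reduceIte]
    intro p hp
    rcases List.mem_cons.mp hp with hp | hp
    · rw [hp]
      have h1 : 1 ≤ x := by
        unfold isCamelAB at hab
        simp only [Bool.and_eq_true, decide_eq_true_eq] at hab
        exact hab.1.1
      exact one_le_intCast _ h1
    · exact ih p hp
  | case3 x h hna hab habb ih =>
    rw [tokenIndicesGo]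
    simp only [h, dif_pos, hna, hab, habb, reduceIte]
    intro p hp
    rcases List.mem_cons.mp hp with hp | hp
    · rw [hp]
      have h1 : 2 ≤ x := by
        unfold isCamelABB at habb
        simp only [Bool.and_eq_true, decide_eq_true_eq] at habb
        exact habb.1.1.1
      exact one_le_intCast_sub_one _ h1
    · exact ih p hp
  | case4 x h hna hab habb ih =>
    rw [tokenIndicesGo]
    simp only [h, dif_pos, hna, hab, habb, reduceIte]
    exact ih
  | case5 x h =>
    rw [tokenIndicesGo]
    simp only [h, dif_neg]
    intro p hp
    cases hp

theorem tokenIndices_snd_pos (cs : List Char) (hne : cs ≠ []) :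
    ∀ p ∈ tokenIndices cs, 1 ≤ p.2 := by
  intro p hp
  unfold tokenIndices at hp
  rcases List.mem_append.mp hp with hp | hp
  · exact tokenIndicesGo_snd_pos cs 0 p hp
  · rcases List.mem_singleton.mp hp with hp
    rw [hp]
    exact one_le_intCast _ (List.length_pos_iff.mpr hne)

theorem collectA_snd_pos (cs : List Char) (limit : Int) (ps : List (Int × Int))
    (toks : List (List Char)) (second count : Int)
    (hps : ∀ p ∈ ps, 1 ≤ p.2) (hsec : 1 ≤ second) :
    1 ≤ (collectA cs limit ps toks second count).2 := by
  induction ps generalizing toks second count with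
  | nil => exact hsec
  | cons p rest ih =>
    obtain ⟨e, n⟩ := p
    have hn : 1 ≤ n := hps (e, n) (List.mem_cons.mpr (Or.inl rfl))
    simp only [collectA]
    split
    · exact le_min hn hsec
    · exact ih _ _ _ (fun q hq => hps q (List.mem_cons.mpr (Or.inr hq))) (le_min hn hsec)

theorem slice_drop_lt (cs : List Char) (hne : cs ≠ []) (sec : Int) (h1 : 1 ≤ sec) :
    (PySem.List.slice cs (some sec) none).length < cs.length := by
  rw [PySem.List.slice_from _ (le_trans zero_le_one h1)]
  rw [List.length_drop]
  exact Nat.sub_lt (List.length_pos_iff.mpr hne)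
    (Int.pos_iff_toNat_pos.mp (lt_of_lt_of_le zero_lt_one h1))

-- _complex_tokenize
def complexTokenizeA (cs : List Char) (limit : Int) : PySem.Set (List Char) :=
  if hne : cs = [] then PySem.Set.empty
  else
    let r := collectA cs limit (tokenIndices cs) [] (cs.length : Int) 0
    let tokens := PySem.Set.ofList
      ((r.1.filter (fun t => !(PySem.Chars.strip t).isEmpty)).map PySem.Chars.lower)
    PySem.Set.union tokens (complexTokenizeA (PySem.List.slice cs (some r.2) none) limit)
termination_by cs.length
decreasing_by
  exact slice_drop_lt cs hne _ (collectA_snd_pos cs limit _ _ _ _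
    (tokenIndices_snd_pos cs hne) (one_le_intCast _ (List.length_pos_iff.mpr hne)))

def complex_tokenize_py (s : String) (limit : Int) : List String :=
  (complexTokenizeA s.toList limit).map (fun t => String.ofList t)

-- ===== PORT B =====

-- _token_ends: one pass with a sliding window (prev2, prev1); i is Python's enumerate counter
def tokenEndsGo (p2 p1 : Option Char) (i : Int) : List Char → List Int
  | [] => []
  | c :: rest =>
    (if PySem.Chars.isalnum c = false then
       (if p1.elim true (fun d => PySem.Chars.isalnum d) then [i - 1] else [])
     else if p1.elim false (fun d => PySem.Chars.islower d) && PySem.Chars.isupper c then [i - 1]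
     else if p2.elim false (fun d => PySem.Chars.isupper d) && p1.elim false (fun d => PySem.Chars.isupper d)
         && PySem.Chars.islower c then [i - 2]
     else []) ++ tokenEndsGo p1 (some c) (i + 1) rest

def tokenEnds (cs : List Char) : List Int :=
  tokenEndsGo none none 0 cs ++ [(cs.length : Int) - 1]

-- next((j for j, c in enumerate(s) if j > first and c.isalnum()), len(s))
def cutB (cs : List Char) (first : Int) : Int :=
  match (PySem.List.enumerate cs 0).find? (fun p => decide (first < p.1) && PySem.Chars.isalnum p.2) with
  | some p => p.1
  | none => (cs.length : Int)

-- lower bound on emitted end positions (used for the loop's termination)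
theorem tokenEndsGo_lb (cs : List Char) :
    ∀ (p2 p1 : Option Char) (i : Int),
      ∀ e ∈ tokenEndsGo p2 p1 i cs,
        (if p2.elim false (fun d => PySem.Chars.isupper d) then i - 2 else i - 1) ≤ e := by
  induction cs with
  | nil => intro p2 p1 i e he; simp [tokenEndsGo] at he
  | cons c rest ih =>
    intro p2 p1 i e he
    simp only [tokenEndsGo, List.mem_append] at he
    rcases he with he | he
    · have hemit : e = i - 1 ∨ (e = i - 2 ∧ p2.elim false (fun d => PySem.Chars.isupper d) = true) := by
        split_ifs at he with g1 g2 g3 g4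
        · exact Or.inl (List.mem_singleton.mp he)
        · simp at he
        · exact Or.inl (List.mem_singleton.mp he)
        · refine Or.inr ⟨List.mem_singleton.mp he, ?_⟩
          simp only [Bool.and_eq_true] at g4
          exact g4.1.1
        · simp at he
      rcases hemit with rfl | ⟨rfl, hp2⟩
      · split <;> omega
      · rw [if_pos hp2]
    · have := ih p1 (some c) (i + 1) e he
      split at this <;> split <;> omega

theorem tokenEnds_ne_nil (cs : List Char) : tokenEnds cs ≠ [] := by
  unfold tokenEnds
  intro h
  have := congrArg List.length h
  simp at this

theorem tokenEnds_headD_mem (cs : List Char) : (tokenEnds cs).headD 0 ∈ tokenEnds cs := by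
  rcases h : tokenEnds cs with _ | ⟨a, t⟩
  · exact absurd h (tokenEnds_ne_nil cs)
  · simp

theorem tokenEnds_headD_nonneg_of_alnum (c : Char) (rest : List Char)
    (h : PySem.Chars.isalnum c = true) : 0 ≤ (tokenEnds (c :: rest)).headD 0 := by
  have hgo : tokenEndsGo none none 0 (c :: rest) = tokenEndsGo none (some c) 1 rest := by
    simp [tokenEndsGo, h]
  have hall : ∀ e ∈ tokenEnds (c :: rest), 0 ≤ e := by
    intro e he
    unfold tokenEnds at he
    rcases List.mem_append.mp he with he | he
    · rw [hgo] at he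
      have := tokenEndsGo_lb rest none (some c) 1 e he
      simpa using this
    · rcases List.mem_singleton.mp he with rfl
      simp only [List.length_cons]
      omega
  exact hall _ (tokenEnds_headD_mem _)

theorem cutB_pos (cs : List Char) (hne : cs ≠ []) :
    1 ≤ cutB cs ((tokenEnds cs).headD 0) := by
  unfold cutB
  split
  case _ p hfind =>
    have hpred := List.find?_some hfind
    have hmem := List.mem_of_find?_eq_some hfind
    rw [PySem.List.mem_enumerate_iff] at hmem
    obtain ⟨k, hk, rfl⟩ := hmem
    simp only [Bool.and_eq_true, decide_eq_true_eq] at hpred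
    obtain ⟨hlt, halnum⟩ := hpred
    simp only [zero_add] at hlt halnum ⊢
    by_cases hk1 : 1 ≤ k
    · exact one_le_intCast _ hk1
    · interval_cases k
      · exfalso
        rcases cs with _ | ⟨c, rest⟩
        · exact hne rfl
        · have h0 : 0 ≤ (tokenEnds (c :: rest)).headD 0 :=
            tokenEnds_headD_nonneg_of_alnum c rest (by simpa using halnum)
          omega
  case _ hfind =>
    exact one_le_intCast _ (List.length_pos_iff.mpr hne)

-- B's while loop over suffixes: one result set
def loopB (cs : List Char) (limit : Int) (acc : PySem.Set (List Char)) : PySem.Set (List Char) :=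
  if hne : cs = [] then acc
  else
    let ends := tokenEnds cs
    let first := ends.headD 0
    let acc2 := (PySem.List.slice ends none (some (max limit 1))).foldl
      (fun a e =>
        let t := PySem.List.slice cs none (some (e + 1))
        if !(PySem.Chars.strip t).isEmpty then PySem.Set.add a (PySem.Chars.lower t) else a) acc
    loopB (PySem.List.slice cs (some (cutB cs first)) none) limit acc2
termination_by cs.length
decreasing_by exact slice_drop_lt cs hne _ (cutB_pos cs hne)

def complex_tokenize_py_alt (s : String) (limit : Int) : List String :=
  (loopB s.toList limit PySem.Set.empty).map (fun t => String.ofList t)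

-- ===== PRECONDITION & SPEC =====
def Spec_complex_tokenize_py (s : String) (limit : Int) (out : List String) : Prop := out = complex_tokenize_py_alt s limit
instance (s : String) (limit : Int) (out : List String) : Decidable (Spec_complex_tokenize_py s limit out) := by unfold Spec_complex_tokenize_py; infer_instance

-- ===== CLAIM (what is proved, stated in full; the proofs are below) =====
def Claim_equal_complex_tokenize_py : Prop := ∀ (s : String) (limit : Int), Dom_complex_tokenize_py s limit → Spec_complex_tokenize_py s limit (complex_tokenize_py s limit)

-- ===== LEMMAS AND PROOFS =====

theorem tokenEnds_mem_lb (cs : List Char) : ∀ e ∈ tokenEnds cs, -1 ≤ e := by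
  intro e he
  unfold tokenEnds at he
  rcases List.mem_append.mp he with he | he
  · have := tokenEndsGo_lb cs none none 0 e he
    simpa using this
  · rcases List.mem_singleton.mp he with rfl
    omega

theorem skipNonAlnum_ge (cs : List Char) (i : Nat) (h : ¬ i < cs.length) :
    skipNonAlnum cs i = i := by
  rw [skipNonAlnum]
  simp [h]

theorem skipNonAlnum_alnum (cs : List Char) (i : Nat) (h : i < cs.length)
    (ha : PySem.Chars.isalnum cs[i] = true) :
    skipNonAlnum cs i = i := by
  rw [skipNonAlnum]
  simp [h, ha]

theorem skipNonAlnum_stop (cs : List Char) (i : Nat)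
    (h : skipNonAlnum cs i < cs.length) :
    PySem.Chars.isalnum cs[skipNonAlnum cs i] = true := by
  induction i using skipNonAlnum.induct cs with
  | case1 x hx ha =>
    have e : skipNonAlnum cs x = x := skipNonAlnum_alnum cs x hx ha
    simp only [e] at h ⊢
    exact ha
  | case2 x hx ha ih =>
    have ha' : PySem.Chars.isalnum cs[x] = false := by
      simpa using ha
    have e : skipNonAlnum cs x = skipNonAlnum cs (x + 1) := skipNonAlnum_step cs x hx ha'
    simp only [e] at h ⊢
    exact ih h
  | case3 x hx =>
    have e : skipNonAlnum cs x = x := skipNonAlnum_ge cs x hx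
    simp only [e] at h
    exact absurd h hx

theorem skipNonAlnum_le_length (cs : List Char) (i : Nat) (h : i ≤ cs.length) :
    skipNonAlnum cs i ≤ cs.length := by
  induction i using skipNonAlnum.induct cs with
  | case1 x hx ha => rw [skipNonAlnum_alnum cs x hx ha]; exact Nat.le_of_lt hx
  | case2 x hx ha ih =>
    rw [skipNonAlnum_step cs x hx (by simpa using ha)]
    exact ih hx
  | case3 x hx => rw [skipNonAlnum_ge cs x hx]; exact h

theorem skipNonAlnum_succ_le (cs : List Char) (a : Nat) :
    skipNonAlnum cs a ≤ skipNonAlnum cs (a + 1) := by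
  by_cases h : a < cs.length
  · by_cases ha : PySem.Chars.isalnum cs[a] = true
    · rw [skipNonAlnum_alnum cs a h ha]
      exact Nat.le_trans (Nat.le_succ a) (self_le_skipNonAlnum cs (a + 1))
    · rw [skipNonAlnum_step cs a h (by simpa using ha)]
  · rw [skipNonAlnum_ge cs a h]
    exact Nat.le_trans (Nat.le_succ a) (self_le_skipNonAlnum cs (a + 1))

theorem skipNonAlnum_mono (cs : List Char) (a b : Nat) (hab : a ≤ b) :
    skipNonAlnum cs a ≤ skipNonAlnum cs b := by
  induction b, hab using Nat.le_induction with
  | base => exact le_refl _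
  | succ n hn ih => exact Nat.le_trans ih (skipNonAlnum_succ_le cs n)

theorem isalnum_of_isupper (c : Char) (h : PySem.Chars.isupper c = true) :
    PySem.Chars.isalnum c = true := by
  simp [PySem.Chars.isalnum, PySem.Chars.isalpha, h]

-- the previous 1 or 2 characters before position i, as B's sliding window sees them
def pOpt (cs : List Char) (k i : Nat) : Option Char := if k ≤ i then cs[i - k]? else none

-- the pair A's generator yields for end position e
def gFun (cs : List Char) (e : Int) : Int × Int :=
  (e, ((skipNonAlnum cs (e + 1).toNat : Nat) : Int))

theorem pOpt_shift (cs : List Char) (i : Nat) : pOpt cs 2 (i + 1) = pOpt cs 1 i := by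
  unfold pOpt
  rcases Nat.eq_zero_or_pos i with rfl | hi
  · simp
  · have h1 : 1 ≤ i := hi
    have h2 : 2 ≤ i + 1 := by omega
    simp only [h1, h2, if_pos]
    congr 1 <;> omega

theorem pOpt_one_succ (cs : List Char) (i : Nat) (h : i < cs.length) :
    pOpt cs 1 (i + 1) = some cs[i] := by
  unfold pOpt
  simp [h]

theorem camelAB_eq (cs : List Char) (i : Nat) (h : i < cs.length) :
    ((pOpt cs 1 i).elim false (fun d => PySem.Chars.islower d) && PySem.Chars.isupper cs[i])
      = isCamelAB cs i := by
  unfold pOpt isCamelAB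
  by_cases h1 : 1 ≤ i
  · have hlt : i - 1 < cs.length := by omega
    simp [h1, List.getElem?_eq_getElem hlt, List.getD_eq_getElem?_getD,
      List.getElem?_eq_getElem h]
  · simp [h1]

theorem camelABB_eq (cs : List Char) (i : Nat) (h : i < cs.length) :
    ((pOpt cs 2 i).elim false (fun d => PySem.Chars.isupper d)
        && (pOpt cs 1 i).elim false (fun d => PySem.Chars.isupper d)
        && PySem.Chars.islower cs[i])
      = isCamelABB cs i := by
  unfold pOpt isCamelABB
  by_cases h2 : 2 ≤ i
  · have h1 : 1 ≤ i := by omega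
    have hlt2 : i - 2 < cs.length := by omega
    have hlt1 : i - 1 < cs.length := by omega
    simp only [h1, h2, if_pos, List.getElem?_eq_getElem hlt2, List.getElem?_eq_getElem hlt1,
      List.getD_eq_getElem?_getD, List.getElem?_eq_getElem h, Option.elim_some, Option.getD_some]
    cases PySem.Chars.isupper cs[i - 2] <;> cases PySem.Chars.isupper cs[i - 1] <;>
      cases PySem.Chars.islower cs[i] <;> simp [h2]
  · by_cases h1 : 1 ≤ i
    · simp [h1, h2]
    · simp [h1, h2]

-- positions strictly inside a non-alphanumeric run emit nothing in B
theorem run_skip (cs : List Char) (m : Nat) (hm : m < cs.length)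
    (hna : PySem.Chars.isalnum cs[m] = false) :
    tokenEndsGo (pOpt cs 2 (m + 1)) (pOpt cs 1 (m + 1)) ((m : Int) + 1) (cs.drop (m + 1)) =
      tokenEndsGo (pOpt cs 2 (skipNonAlnum cs (m + 1))) (pOpt cs 1 (skipNonAlnum cs (m + 1)))
        ((skipNonAlnum cs (m + 1) : Nat) : Int) (cs.drop (skipNonAlnum cs (m + 1))) := by
  by_cases h1 : m + 1 < cs.length
  · by_cases ha : PySem.Chars.isalnum cs[m + 1] = true
    · rw [skipNonAlnum_alnum cs (m + 1) h1 ha]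
      have hc : (((m + 1 : Nat)) : Int) = (m : Int) + 1 := by push_cast; ring
      rw [hc]
    · have ha' : PySem.Chars.isalnum cs[m + 1] = false := by simpa using ha
      have hdrop : cs.drop (m + 1) = cs[m + 1] :: cs.drop (m + 2) :=
        List.drop_eq_getElem_cons h1
      have hp1 : pOpt cs 1 (m + 1) = some cs[m] := pOpt_one_succ cs m hm
      have hstep : tokenEndsGo (pOpt cs 2 (m + 1)) (pOpt cs 1 (m + 1)) ((m : Int) + 1) (cs.drop (m + 1))
          = tokenEndsGo (pOpt cs 2 (m + 2)) (pOpt cs 1 (m + 2)) ((m : Int) + 1 + 1) (cs.drop (m + 2)) := by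
        rw [hdrop]
        show (if PySem.Chars.isalnum cs[m+1] = false then _ else _) ++ _ = _
        rw [pOpt_shift cs (m + 1), pOpt_one_succ cs (m + 1) h1, hp1]
        simp [ha', hna, pOpt_shift]
      rw [hstep, skipNonAlnum_step cs (m + 1) h1 ha']
      have := run_skip cs (m + 1) h1 ha'
      simpa [add_assoc] using this
  · rw [skipNonAlnum_ge cs (m + 1) h1]
    have hc : (((m + 1 : Nat)) : Int) = (m : Int) + 1 := by push_cast; ring
    rw [hc]
termination_by cs.length - m

-- A's cursor generator and B's window scan produce the same boundary stream
theorem go_eq (cs : List Char) (i : Nat)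
    (hinv : i = 0 ∨ PySem.Chars.isalnum (cs.getD (i - 1) ' ') = true ∨
      ∀ h : i < cs.length, PySem.Chars.isalnum cs[i] = true) :
    tokenIndicesGo cs i =
      (tokenEndsGo (pOpt cs 2 i) (pOpt cs 1 i) (i : Int) (cs.drop i)).map (gFun cs) := by
  by_cases h : i < cs.length
  · have hdrop : cs.drop i = cs[i] :: cs.drop (i + 1) := List.drop_eq_getElem_cons h
    rw [tokenIndicesGo, hdrop]
    simp only [h, dif_pos]
    have hp1succ : pOpt cs 1 (i + 1) = some cs[i] := pOpt_one_succ cs i h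
    by_cases hna : PySem.Chars.isalnum cs[i] = false
    · -- non-alphanumeric run start
      have hcond : (pOpt cs 1 i).elim true (fun d => PySem.Chars.isalnum d) = true := by
        rcases hinv with h0 | hprev | hcur
        · subst h0; simp [pOpt]
        · unfold pOpt
          by_cases h1 : 1 ≤ i
          · have hlt : i - 1 < cs.length := by omega
            rw [List.getD_eq_getElem?_getD, List.getElem?_eq_getElem hlt] at hprev
            simp only [Option.getD_some] at hprev
            simp [h1, List.getElem?_eq_getElem hlt, hprev]
          · simp [h1]
        · rw [hcur h] at hna; simp at hna
      have hskip : skipNonAlnum cs i = skipNonAlnum cs (i + 1) := skipNonAlnum_step cs i h hna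
      have hrec := go_eq cs (skipNonAlnum cs i)
        (Or.inr (Or.inr (fun hh => skipNonAlnum_stop cs i hh)))
      have hgo : tokenEndsGo (pOpt cs 2 i) (pOpt cs 1 i) (i : Int) (cs[i] :: cs.drop (i + 1))
          = (i - 1 : Int) :: tokenEndsGo (pOpt cs 1 i) (some cs[i]) ((i : Int) + 1) (cs.drop (i + 1)) := by
        show (if PySem.Chars.isalnum cs[i] = false then _ else _) ++ _ = _
        simp [hna, hcond]
      have hstate : tokenEndsGo (pOpt cs 1 i) (some cs[i]) ((i : Int) + 1) (cs.drop (i + 1))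
          = tokenEndsGo (pOpt cs 2 (i + 1)) (pOpt cs 1 (i + 1)) ((i : Int) + 1) (cs.drop (i + 1)) := by
        rw [pOpt_shift cs i, hp1succ]
      have hrun := run_skip cs i h hna
      rw [dif_pos hna, hgo, hstate, hrun, ← hskip, List.map_cons, hrec]
      congr 1
      have ht : ((i : Int) - 1 + 1).toNat = i := by omega
      simp [gFun, ht]
    · -- alphanumeric position
      have hna' : PySem.Chars.isalnum cs[i] = true := by simpa using hna
      have hskipi : skipNonAlnum cs i = i := skipNonAlnum_alnum cs i h hna'
      have hrec := go_eq cs (i + 1) (by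
        refine Or.inr (Or.inl ?_)
        simp only [Nat.add_sub_cancel]
        rw [List.getD_eq_getElem?_getD, List.getElem?_eq_getElem h]
        simpa using hna')
      have hstate : tokenEndsGo (pOpt cs 1 i) (some cs[i]) ((i : Int) + 1) (cs.drop (i + 1))
          = tokenEndsGo (pOpt cs 2 (i + 1)) (pOpt cs 1 (i + 1)) (((i + 1 : Nat) : Int)) (cs.drop (i + 1)) := by
        rw [pOpt_shift cs i, hp1succ]
        norm_num
      by_cases hab : isCamelAB cs i = true
      · have hgo : tokenEndsGo (pOpt cs 2 i) (pOpt cs 1 i) (i : Int) (cs[i] :: cs.drop (i + 1))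
            = (i - 1 : Int) :: tokenEndsGo (pOpt cs 1 i) (some cs[i]) ((i : Int) + 1) (cs.drop (i + 1)) := by
          show (if PySem.Chars.isalnum cs[i] = false then _ else _) ++ _ = _
          rw [camelAB_eq cs i h] at *
          simp [hna, hab]
        rw [dif_neg hna, if_pos hab, hgo, hstate, List.map_cons, hrec]
        congr 1
        have ht : ((i : Int) - 1 + 1).toNat = i := by omega
        simp [gFun, ht, hskipi]
      · have hab' : isCamelAB cs i = false := by simpa using hab
        by_cases habb : isCamelABB cs i = true
        · have h2 : 2 ≤ i := by
            unfold isCamelABB at habb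
            simp only [Bool.and_eq_true, decide_eq_true_eq] at habb
            exact habb.1.1.1
          have hup : PySem.Chars.isupper cs[i - 1] = true := by
            unfold isCamelABB at habb
            simp only [Bool.and_eq_true, decide_eq_true_eq] at habb
            have := habb.1.2
            have hlt : i - 1 < cs.length := by omega
            rwa [List.getD_eq_getElem?_getD, List.getElem?_eq_getElem hlt] at this
          have hgo : tokenEndsGo (pOpt cs 2 i) (pOpt cs 1 i) (i : Int) (cs[i] :: cs.drop (i + 1))
              = (i - 2 : Int) :: tokenEndsGo (pOpt cs 1 i) (some cs[i]) ((i : Int) + 1) (cs.drop (i + 1)) := by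
            show (if PySem.Chars.isalnum cs[i] = false then _ else _) ++ _ = _
            rw [camelAB_eq cs i h, camelABB_eq cs i h] at *
            simp [hna, hab', habb]
          rw [dif_neg hna, if_neg hab, if_pos habb, hgo, hstate, List.map_cons, hrec]
          congr 1
          have ht : ((i : Int) - 2 + 1).toNat = i - 1 := by omega
          have hlt : i - 1 < cs.length := by omega
          have hskip1 : skipNonAlnum cs (i - 1) = i - 1 :=
            skipNonAlnum_alnum cs (i - 1) hlt (isalnum_of_isupper _ hup)
          simp only [gFun]
          rw [ht, hskip1]
          simp only [Prod.mk.injEq, true_and]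
          omega
        · have habb' : isCamelABB cs i = false := by simpa using habb
          have hgo : tokenEndsGo (pOpt cs 2 i) (pOpt cs 1 i) (i : Int) (cs[i] :: cs.drop (i + 1))
              = tokenEndsGo (pOpt cs 1 i) (some cs[i]) ((i : Int) + 1) (cs.drop (i + 1)) := by
            show (if PySem.Chars.isalnum cs[i] = false then _ else _) ++ _ = _
            rw [camelAB_eq cs i h, camelABB_eq cs i h] at *
            simp [hna, hab', habb']
          rw [dif_neg hna, if_neg hab, if_neg habb, hgo, hstate, hrec]
  · rw [tokenIndicesGo]
    simp only [h, dif_neg]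
    have hdrop : cs.drop i = [] := List.drop_of_length_le (by omega)
    rw [hdrop]
    rfl
termination_by cs.length - i
decreasing_by
  all_goals first
    | omega
    | (have h2 := lt_skipNonAlnum cs i h hna; omega)

theorem tokenIndices_eq (cs : List Char) :
    tokenIndices cs = (tokenEnds cs).map (gFun cs) := by
  unfold tokenIndices tokenEnds
  have e2 : pOpt cs 2 0 = none := by simp [pOpt]
  have e1 : pOpt cs 1 0 = none := by simp [pOpt]
  have hgo := go_eq cs 0 (Or.inl rfl)
  rw [e1, e2, List.drop_zero] at hgo
  rw [hgo, List.map_append]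
  congr 1
  simp only [List.map_cons, List.map_nil]
  unfold gFun
  have h1 : ((cs.length : Int) - 1 + 1).toNat = cs.length := by omega
  rw [h1, skipNonAlnum_ge cs cs.length (by omega)]

-- A's inner loop with a non-empty token accumulator, split off
theorem collectA_append (cs : List Char) (limit : Int) (ps : List (Int × Int))
    (toks : List (List Char)) (second count : Int) :
    collectA cs limit ps toks second count =
      (toks ++ (collectA cs limit ps [] second count).1,
       (collectA cs limit ps [] second count).2) := by
  induction ps generalizing toks second count with
  | nil => simp [collectA]
  | cons p rest ih =>
    obtain ⟨e, n⟩ := p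
    simp only [collectA]
    split
    · simp
    · rw [ih (toks ++ [PySem.List.slice cs (some 0) (some (e + 1))]),
        ih ([] ++ [PySem.List.slice cs (some 0) (some (e + 1))])]
      simp

-- A's counting/min loop over the mapped boundary stream, in closed form
theorem collectA_eval (cs : List Char) (limit : Int) :
    ∀ (es : List Int) (second count : Int),
      collectA cs limit (es.map (gFun cs)) [] second count =
        ((es.take ((max (limit - count) 1).toNat)).map
            (fun e => PySem.List.slice cs (some 0) (some (e + 1))),
         ((es.take ((max (limit - count) 1).toNat)).map
            (fun e => ((skipNonAlnum cs (e + 1).toNat : Nat) : Int))).foldl min second) := by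
  intro es
  induction es with
  | nil => intro second count; simp [collectA]
  | cons e rest ih =>
    intro second count
    have hmax1 : (1 : Int) ≤ max (limit - count) 1 := le_max_right _ _
    have hK1 : 1 ≤ (max (limit - count) 1).toNat := by omega
    rcases Nat.exists_eq_add_of_le hK1 with ⟨K', hK'⟩
    simp only [List.map_cons, collectA]
    by_cases hbr : limit ≤ count + 1
    · have hK : (max (limit - count) 1).toNat = 1 := by
        have : max (limit - count) 1 = 1 := max_eq_right (by omega)
        omega
      rw [if_pos hbr, hK]
      simp [gFun, min_comm]
    · rw [if_neg hbr]
      have hK : (max (limit - count) 1).toNat = (max (limit - (count + 1)) 1).toNat + 1 := by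
        have h2 : (2 : Int) ≤ limit - count := by omega
        have e1 : max (limit - count) 1 = limit - count := max_eq_left (by omega)
        have e2 : max (limit - (count + 1)) 1 = limit - (count + 1) := max_eq_left (by omega)
        rw [e1, e2]
        omega
      rw [collectA_append cs limit (rest.map (gFun cs)) ([] ++ [_]) _ _, ih _ (count + 1), hK]
      simp [gFun, min_comm]

-- B's inner fold adds the filtered, lowered prefixes to the accumulator set
theorem foldB_eq (cs : List Char) :
    ∀ (es : List Int) (acc : PySem.Set (List Char)),
      es.foldl (fun a e =>
          let t := PySem.List.slice cs none (some (e + 1))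
          if !(PySem.Chars.strip t).isEmpty then PySem.Set.add a (PySem.Chars.lower t) else a) acc
        = PySem.Set.update acc
            (((es.map (fun e => PySem.List.slice cs none (some (e + 1)))).filter
                (fun t => !(PySem.Chars.strip t).isEmpty)).map PySem.Chars.lower) := by
  intro es
  induction es with
  | nil => intro acc; simp [PySem.Set.update_nil]
  | cons e rest ih =>
    intro acc
    simp only [List.foldl_cons, List.map_cons, List.filter_cons]
    cases hc : (PySem.Chars.strip (PySem.List.slice cs none (some (e + 1)))).isEmpty with
    | true =>
      simp only [hc, Bool.not_true, Bool.false_eq_true, if_false]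
      exact ih acc
    | false =>
      simp only [hc, Bool.not_false, if_true, List.map_cons]
      rw [ih, PySem.Set.update_cons]

-- upper bound on emitted end positions
theorem tokenEndsGo_ub (cs : List Char) :
    ∀ (p2 p1 : Option Char) (i : Int),
      ∀ e ∈ tokenEndsGo p2 p1 i cs, e ≤ i + cs.length - 1 := by
  induction cs with
  | nil => intro p2 p1 i e he; simp [tokenEndsGo] at he
  | cons c rest ih =>
    intro p2 p1 i e he
    simp only [tokenEndsGo, List.mem_append] at he
    rcases he with he | he
    · split_ifs at he <;> simp only [List.mem_singleton, List.not_mem_nil] at he <;>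
        subst he <;> simp only [List.length_cons] <;> omega
    · have := ih p1 (some c) (i + 1) e he
      simp only [List.length_cons]
      omega

theorem tokenEnds_mem_ub (cs : List Char) : ∀ e ∈ tokenEnds cs, e ≤ (cs.length : Int) - 1 := by
  intro e he
  unfold tokenEnds at he
  rcases List.mem_append.mp he with he | he
  · have := tokenEndsGo_ub cs none none 0 e he
    omega
  · rcases List.mem_singleton.mp he with rfl
    omega

-- the emitted end positions are nondecreasing, so the head is minimal
theorem tokenEndsGo_sorted (cs : List Char) :
    ∀ (p2 p1 : Option Char) (i : Int),
      (tokenEndsGo p2 p1 i cs).Pairwise (· ≤ ·) := by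
  induction cs with
  | nil => intro p2 p1 i; simp [tokenEndsGo]
  | cons c rest ih =>
    intro p2 p1 i
    simp only [tokenEndsGo]
    rw [List.pairwise_append]
    refine ⟨?_, ih p1 (some c) (i + 1), ?_⟩
    · split_ifs <;> simp
    · intro x hx y hy
      have hylb := tokenEndsGo_lb rest p1 (some c) (i + 1) y hy
      have hxub : x ≤ i - 1 := by
        split_ifs at hx <;> simp only [List.mem_singleton, List.not_mem_nil] at hx <;>
          subst hx <;> omega
      split at hylb <;> omega

theorem tokenEnds_head_min (cs : List Char) :
    ∀ e ∈ tokenEnds cs, (tokenEnds cs).headD 0 ≤ e := by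
  have hpw : (tokenEnds cs).Pairwise (· ≤ ·) := by
    unfold tokenEnds
    rw [List.pairwise_append]
    refine ⟨tokenEndsGo_sorted cs none none 0, by simp, ?_⟩
    intro x hx y hy
    rcases List.mem_singleton.mp hy with rfl
    have := tokenEndsGo_ub cs none none 0 x hx
    omega
  intro e he
  rcases h : tokenEnds cs with _ | ⟨a, t⟩
  · exact absurd h (tokenEnds_ne_nil cs)
  · rw [h] at hpw he
    simp only [List.headD_cons]
    rcases List.mem_cons.mp he with rfl | he
    · exact le_refl _
    · exact (List.pairwise_cons.mp hpw).1 e he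

-- the running min over the collected pairs is the cut at the first token end
theorem foldl_min_eq_head (cs : List Char) (hne : cs ≠ []) (K : Nat) (hK : 1 ≤ K) :
    (((tokenEnds cs).take K).map
        (fun e => ((skipNonAlnum cs (e + 1).toNat : Nat) : Int))).foldl min ((cs.length : Int))
      = ((skipNonAlnum cs (((tokenEnds cs).headD 0 + 1).toNat) : Nat) : Int) := by
  rcases h : tokenEnds cs with _ | ⟨a, t⟩
  · exact absurd h (tokenEnds_ne_nil cs)
  · have hhead : (tokenEnds cs).headD 0 = a := by rw [h]; rfl
    have hmin : ∀ e ∈ tokenEnds cs, a ≤ e := by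
      intro e he
      have := tokenEnds_head_min cs e he
      rwa [hhead] at this
    have ha_mem : a ∈ tokenEnds cs := by rw [h]; exact List.mem_cons_self
    have hsa_len : ((skipNonAlnum cs ((a + 1).toNat) : Nat) : Int) ≤ (cs.length : Int) := by
      have h1 := tokenEnds_mem_ub cs a ha_mem
      have h2 : (a + 1).toNat ≤ cs.length := by omega
      exact_mod_cast skipNonAlnum_le_length cs _ h2
    obtain ⟨K', rfl⟩ : ∃ K', K = K' + 1 := ⟨K - 1, by omega⟩
    rw [show ((a :: t).headD 0) = a from rfl]
    rw [List.take_succ_cons, List.map_cons, List.foldl_cons]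
    set sa := ((skipNonAlnum cs ((a + 1).toNat) : Nat) : Int) with hsa
    set l := ((t.take K').map (fun e => ((skipNonAlnum cs (e + 1).toNat : Nat) : Int))) with hl
    have hlow : ∀ y ∈ l, sa ≤ y := by
      intro y hy
      rw [hl] at hy
      rcases List.mem_map.mp hy with ⟨e, he, rfl⟩
      have hmem : e ∈ tokenEnds cs := by
        rw [h]
        exact List.mem_cons.mpr (Or.inr (List.mem_of_mem_take he))
      have h1 := hmin e hmem
      have h2 := skipNonAlnum_mono cs ((a + 1).toNat) ((e + 1).toNat) (by omega)
      rw [hsa]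
      exact_mod_cast h2
    rw [min_eq_right hsa_len]
    rcases PySem.List.foldl_min_mem l sa with h2 | h2
    · exact h2
    · exact le_antisymm ((PySem.List.foldl_min_le l sa).1) (hlow _ h2)

-- B's next()/enumerate scan from position t equals A's inner while loop
theorem find_drop (cs : List Char) (first : Int) (t : Nat) (hft : first < (t : Int))
    (htl : t ≤ cs.length) :
    (match (PySem.List.enumerate (cs.drop t) (t : Int)).find?
        (fun p => decide (first < p.1) && PySem.Chars.isalnum p.2) with
     | some p => p.1
     | none => ((cs.length : Int))) = ((skipNonAlnum cs t : Nat) : Int) := by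
  by_cases h : t < cs.length
  · have hdrop : cs.drop t = cs[t] :: cs.drop (t + 1) := List.drop_eq_getElem_cons h
    rw [hdrop, PySem.List.enumerate_cons]
    by_cases ha : PySem.Chars.isalnum cs[t] = true
    · rw [List.find?_cons_of_pos]
      · simp [skipNonAlnum_alnum cs t h ha]
      · simp [hft, ha]
    · have ha' : PySem.Chars.isalnum cs[t] = false := by simpa using ha
      rw [List.find?_cons_of_neg]
      · have hcast : ((t : Int) + 1) = ((t + 1 : Nat) : Int) := by push_cast; ring
        rw [hcast]
        rw [find_drop cs first (t + 1) (by push_cast; omega) (by omega)]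
        rw [skipNonAlnum_step cs t h ha']
      · simp [ha']
  · have ht : t = cs.length := by omega
    subst ht
    rw [List.drop_length]
    simp [PySem.List.enumerate_nil, skipNonAlnum_ge cs cs.length (by omega)]
termination_by cs.length - t

theorem cutB_eq_skip (cs : List Char) (first : Int) (hlb : -1 ≤ first)
    (hub : first ≤ (cs.length : Int) - 1) :
    cutB cs first = ((skipNonAlnum cs (first + 1).toNat : Nat) : Int) := by
  unfold cutB
  set t := (first + 1).toNat with ht
  have htv : (t : Int) = first + 1 := by omega
  have htl : t ≤ cs.length := by omega
  have hsplit : cs = cs.take t ++ cs.drop t := (List.take_append_drop t cs).symm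
  rw [show PySem.List.enumerate cs 0 = PySem.List.enumerate (cs.take t ++ cs.drop t) 0 by rw [← hsplit]]
  rw [PySem.List.enumerate_append]
  rw [List.find?_append]
  have hlen : (cs.take t).length = t := by
    rw [List.length_take]
    omega
  have hpre : (PySem.List.enumerate (cs.take t) 0).find?
      (fun p => decide (first < p.1) && PySem.Chars.isalnum p.2) = none := by
    rw [List.find?_eq_none]
    intro p hp
    rw [PySem.List.mem_enumerate_iff] at hp
    obtain ⟨k, hk, rfl⟩ := hp
    rw [hlen] at hk
    simp only [zero_add, Bool.and_eq_true, decide_eq_true_eq, not_and]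
    intro hcon
    omega
  rw [hpre, Option.none_or]
  rw [hlen]
  simp only [zero_add]
  exact find_drop cs first t (by omega) htl

-- the common insertion stream of both programs, one level per suffix
def streamS (cs : List Char) (limit : Int) : List (List Char) :=
  if hne : cs = [] then []
  else
    let r := collectA cs limit (tokenIndices cs) [] (cs.length : Int) 0
    ((r.1.filter (fun t => !(PySem.Chars.strip t).isEmpty)).map PySem.Chars.lower) ++
      streamS (PySem.List.slice cs (some r.2) none) limit
termination_by cs.length
decreasing_by
  exact slice_drop_lt cs hne _ (collectA_snd_pos cs limit _ _ _ _
    (tokenIndices_snd_pos cs hne) (one_le_intCast _ (List.length_pos_iff.mpr hne)))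

-- set(xs) inserted into s is the same as xs inserted into s
theorem update_ofList (xs s : List (List Char)) :
    PySem.Set.update s (PySem.Set.ofList xs) = PySem.Set.update s xs := by
  induction xs using List.reverseRecOn generalizing s with
  | nil => rfl
  | append_singleton ys y ih =>
    rw [PySem.Set.ofList_append, PySem.Set.update_append]
    by_cases hy : y ∈ PySem.Set.ofList ys
    · have hmem : y ∈ ys := (PySem.Set.mem_ofList ys y).mp hy
      rw [show (PySem.Set.ofList ys).update [y] = PySem.Set.ofList ys by
        rw [PySem.Set.update_cons, PySem.Set.add_of_mem hy, PySem.Set.update_nil]]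
      rw [ih, PySem.Set.update_cons, PySem.Set.update_nil,
        PySem.Set.add_of_mem (by rw [PySem.Set.mem_update]; exact Or.inr hmem)]
    · rw [show (PySem.Set.ofList ys).update [y] = PySem.Set.ofList ys ++ [y] by
        rw [PySem.Set.update_cons, PySem.Set.add_of_not_mem hy, PySem.Set.update_nil]]
      rw [PySem.Set.update_append, ih]

-- A's recursion materialises its insertion stream as a set
theorem A_eq_stream (cs : List Char) (limit : Int) :
    complexTokenizeA cs limit = PySem.Set.ofList (streamS cs limit) := by
  induction cs using complexTokenizeA.induct limit with
  | case1 =>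
    rw [complexTokenizeA, streamS]
    simp
  | case2 cs hne r ih =>
    rw [complexTokenizeA, streamS]
    simp only [hne, dif_neg, reduceDIte]
    show PySem.Set.union _ _ = _
    rw [PySem.Set.ofList_append]
    show PySem.Set.update _ _ = _
    rw [ih, update_ofList]

-- the per-level agreement: B's fold and cut equal A's collected tokens and min
theorem level_eq (cs : List Char) (limit : Int) (hne : cs ≠ []) (acc : PySem.Set (List Char)) :
    ((PySem.List.slice (tokenEnds cs) none (some (max limit 1))).foldl
        (fun a e =>
          let t := PySem.List.slice cs none (some (e + 1))
          if !(PySem.Chars.strip t).isEmpty then PySem.Set.add a (PySem.Chars.lower t) else a) acc,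
      cutB cs ((tokenEnds cs).headD 0))
      = (PySem.Set.update acc
          (((collectA cs limit (tokenIndices cs) [] (cs.length : Int) 0).1.filter
              (fun t => !(PySem.Chars.strip t).isEmpty)).map PySem.Chars.lower),
        (collectA cs limit (tokenIndices cs) [] (cs.length : Int) 0).2) := by
  have hKpos : (0 : Int) ≤ max limit 1 := le_trans zero_le_one (le_max_right _ _)
  have hslice : PySem.List.slice (tokenEnds cs) none (some (max limit 1))
      = (tokenEnds cs).take ((max limit 1).toNat) := PySem.List.slice_to _ hKpos
  have hK1 : 1 ≤ (max limit 1).toNat := by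
    have := le_max_right limit 1
    omega
  have hcoll := collectA_eval cs limit (tokenEnds cs) ((cs.length : Int)) 0
  rw [tokenIndices_eq cs, hcoll]
  have hzero : limit - 0 = limit := by ring
  rw [hzero]
  simp only [Prod.mk.injEq]
  constructor
  · rw [hslice, foldB_eq]
    have htok : ((tokenEnds cs).take ((max limit 1).toNat)).map
          (fun e => PySem.List.slice cs (some 0) (some (e + 1)))
        = ((tokenEnds cs).take ((max limit 1).toNat)).map
          (fun e => PySem.List.slice cs none (some (e + 1))) := by
      apply List.map_congr_left
      intro e _
      simp
    rw [htok]
  · rw [foldl_min_eq_head cs hne ((max limit 1).toNat) hK1]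
    have hmemh := tokenEnds_headD_mem cs
    exact cutB_eq_skip cs ((tokenEnds cs).headD 0)
      (tokenEnds_mem_lb cs _ hmemh) (tokenEnds_mem_ub cs _ hmemh)

-- B's loop appends the same stream to its accumulator
theorem B_eq_stream (limit : Int) : ∀ (n : Nat) (cs : List Char), cs.length ≤ n →
    ∀ (acc : PySem.Set (List Char)), loopB cs limit acc = PySem.Set.update acc (streamS cs limit) := by
  intro n
  induction n with
  | zero =>
    intro cs hlen acc
    have hnil : cs = [] := by
      cases cs with
      | nil => rfl
      | cons a l => simp at hlen
    subst hnil
    rw [loopB, streamS]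
    simp [PySem.Set.update_nil]
  | succ n ih =>
    intro cs hlen acc
    by_cases hne : cs = []
    · subst hne
      rw [loopB, streamS]
      simp [PySem.Set.update_nil]
    · rw [loopB, streamS]
      simp only [hne, reduceDIte]
      have hlv := level_eq cs limit hne acc
      have h1 := congrArg Prod.fst hlv
      have h2 := congrArg Prod.snd hlv
      simp only at h1 h2
      rw [PySem.Set.update_append, ← h1, ← h2]
      refine ih (PySem.List.slice cs (some (cutB cs ((tokenEnds cs).headD 0))) none) ?_ _
      have hlt := slice_drop_lt cs hne _ (cutB_pos cs hne)
      omega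

theorem A_eq_B (cs : List Char) (limit : Int) :
    complexTokenizeA cs limit = loopB cs limit PySem.Set.empty := by
  rw [B_eq_stream limit cs.length cs le_rfl PySem.Set.empty, A_eq_stream]
  show _ = PySem.Set.update [] _
  rw [PySem.Set.update_nil_left]

-- ===== VERDICT (by name: the statement is the Claim_ definition above) =====
theorem complex_tokenize_py_spec : Claim_equal_complex_tokenize_py := by
  intro s limit _
  unfold Spec_complex_tokenize_py complex_tokenize_py complex_tokenize_py_alt
  rw [A_eq_B]
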